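-- pv_equiv track=rewrite | github.com/jbkr0/Advent-of-Code-2024 | day12/main2.py | count_side
-- ===== SOURCE A (Python) =====
-- def count_side(islands):
--     count = 0
--     for island in islands:
--
--         nb_sides = 0
--         layers = {}
--         for i, j in island:
--             if i not in layers:
--                 layers[i] = []
--             layers[i].append((i, j))
--
--         # count top side
--         last_line = []
--         for _, layer in sorted(layers.items(), key=lambda x: x[0]):
--
--             layer_side = []
--             for i, j in layer:
--                 if (i - 1, j) in last_line:
--                     continue
--                 layer_side.append((i, j))
--
--             last_j = -2
--             for _, j in sorted(layer_side, key=lambda x: x[1]):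
--                 if j != last_j + 1:
--                     nb_sides += 1
--                 last_j = j
--
--             last_line.clear()
--             for e in layer:
--                 last_line.append(e)
--
--         # count bottom side
--         last_line = []
--         for _, layer in sorted(layers.items(), key=lambda x: x[0], reverse=True):
--             layer_side = []
--             for i, j in layer:
--                 if (i + 1, j) in last_line:
--                     continue
--                 layer_side.append((i, j))
--
--             last_j = -2
--             for _, j in sorted(layer_side, key=lambda x: x[1]):
--                 if j != last_j + 1:
--                     nb_sides += 1
--                 last_j = j
--
--             last_line.clear()
--             for e in layer:
--                 last_line.append(e)
--
--         layers = {}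
--         for i, j in island:
--             if j not in layers:
--                 layers[j] = []
--             layers[j].append((i, j))
--
--         # count left side
--         last_line = []
--         for _, layer in sorted(layers.items(), key=lambda x: x[0]):
--
--             layer_side = []
--             for i, j in layer:
--                 if (i, j - 1) in last_line:
--                     continue
--                 layer_side.append((i, j))
--
--             last_i = -2
--             for i, _ in sorted(layer_side, key=lambda x: x[0]):
--                 if i != last_i + 1:
--                     nb_sides += 1
--                 last_i = i
--
--             last_line.clear()
--             for e in layer:
--                 last_line.append(e)
--
--         # count right side
--         last_line = []
--         for _, layer in sorted(layers.items(), key=lambda x: x[0], reverse=True):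
--
--             layer_side = []
--             for i, j in layer:
--                 if (i, j + 1) in last_line:
--                     continue
--                 layer_side.append((i, j))
--
--             last_i = -2
--             for i, _ in sorted(layer_side, key=lambda x: x[0]):
--                 if i != last_i + 1:
--                     nb_sides += 1
--                 last_i = i
--
--             last_line.clear()
--             for e in layer:
--                 last_line.append(e)
--
--         count += len(island) * nb_sides
--     return count
-- ===== SOURCE B (Python) =====
-- def count_side(islands):
--     # One pass per direction over the island's cells: collect the scan coordinates of
--     # the cells exposed in that direction (O(1) set membership), grouped by line, and
--     # count the runs of consecutive coordinates on each line (each run is one side).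
--     total = 0
--     for island in islands:
--         s = set(island)
--         sides = 0
--         for di, dj in ((-1, 0), (1, 0), (0, -1), (0, 1)):
--             runs = {}
--             for i, j in island:
--                 if (i + di, j + dj) not in s:
--                     line, x = (i, j) if dj == 0 else (j, i)
--                     runs.setdefault(line, []).append(x)
--             for xs in runs.values():
--                 last = -2
--                 for x in sorted(xs):
--                     if x != last + 1:
--                         sides += 1
--                     last = x
--         total += len(island) * sides
--     return total
-- ===== Notes on version B (the rewrite author's own statement) =====
-- stated objective: faster
-- what changed: Replaces A's four copy-pasted layer sweeps (two grouping dicts, sorted layer items, and a last_line list rescanned for every cell) by one direction-parameterized pass that collects the exposed cells' scan coordinates per line with O(1) set membership and counts runs of consecutive coordinates per line.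
import Mathlib
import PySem

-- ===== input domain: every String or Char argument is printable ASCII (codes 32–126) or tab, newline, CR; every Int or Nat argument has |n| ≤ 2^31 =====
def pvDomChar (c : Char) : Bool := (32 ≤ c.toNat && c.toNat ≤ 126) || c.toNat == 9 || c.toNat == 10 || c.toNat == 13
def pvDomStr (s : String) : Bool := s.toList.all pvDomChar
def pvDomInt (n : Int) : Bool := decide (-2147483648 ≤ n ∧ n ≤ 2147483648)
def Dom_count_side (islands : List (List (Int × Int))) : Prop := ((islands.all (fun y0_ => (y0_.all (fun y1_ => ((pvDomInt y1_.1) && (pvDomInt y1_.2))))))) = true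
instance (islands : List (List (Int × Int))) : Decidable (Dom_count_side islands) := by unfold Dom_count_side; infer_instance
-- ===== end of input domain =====

-- B replaces A's four sort-and-sweep passes (grouping dicts + last_line rescans) by one direction-parameterized pass that groups exposed scan coordinates per line via a set and counts runs; return-value equivalence proved on every input.


-- ===== PORT A =====
-- grouping loop:  if i not in layers: layers[i] = [] ; layers[i].append((i, j))
def pvGroup (key : Int × Int → Int) (island : List (Int × Int)) : PySem.Dict Int (List (Int × Int)) :=
  island.foldl
    (fun layers c =>
      (if layers.contains (key c) then layers else layers.insert (key c) []).modify
        (key c) [] (fun l => l ++ [c]))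
    PySem.Dict.empty

-- one sweep block body: build layer_side skipping cells whose adj-neighbour is in last_line,
-- then the run-count loop over sorted(layer_side, key=sel) with last initialised to -2,
-- then last_line := layer
def pvSweepStep (adj : Int × Int → Int × Int) (sel : Int × Int → Int)
    (st : Int × List (Int × Int)) (kl : Int × List (Int × Int)) : Int × List (Int × Int) :=
  let layer_side := kl.2.foldl (fun acc c => if adj c ∈ st.2 then acc else acc ++ [c]) []
  let nb := ((PySem.List.sorted layer_side sel).foldl
      (fun (q : Int × Int) c => (if sel c ≠ q.2 + 1 then q.1 + 1 else q.1, sel c)) (st.1, -2)).1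
  (nb, kl.2)

-- a whole 'for _, layer in sorted(layers.items(), …)' sweep, threading nb_sides
def pvSweep (adj : Int × Int → Int × Int) (sel : Int × Int → Int)
    (layersSorted : List (Int × List (Int × Int))) (nb0 : Int) : Int :=
  (layersSorted.foldl (pvSweepStep adj sel) (nb0, [])).1

def count_side (islands : List (List (Int × Int))) : Int :=
  islands.foldl
    (fun count island =>
      let layersI := pvGroup (fun c => c.1) island
      let nb1 := pvSweep (fun c => (c.1 - 1, c.2)) (fun c => c.2)
        (PySem.List.sorted layersI.items (fun x => x.1)) 0
      let nb2 := pvSweep (fun c => (c.1 + 1, c.2)) (fun c => c.2)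
        (PySem.List.sorted layersI.items (fun x => x.1) true) nb1
      let layersJ := pvGroup (fun c => c.2) island
      let nb3 := pvSweep (fun c => (c.1, c.2 - 1)) (fun c => c.1)
        (PySem.List.sorted layersJ.items (fun x => x.1)) nb2
      let nb4 := pvSweep (fun c => (c.1, c.2 + 1)) (fun c => c.1)
        (PySem.List.sorted layersJ.items (fun x => x.1) true) nb3
      count + PySem.List.len island * nb4)
    0

-- ===== PORT B =====
-- per direction: runs.setdefault(line, []).append(x) for every exposed cell, then count
-- runs of consecutive coordinates per line
def count_side_alt (islands : List (List (Int × Int))) : Int :=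
  islands.foldl
    (fun total island =>
      let s := PySem.Set.ofList island
      let sides := [((-1 : Int), (0 : Int)), (1, 0), (0, -1), (0, 1)].foldl
        (fun sides d =>
          let runs := island.foldl
            (fun runs c =>
              if (c.1 + d.1, c.2 + d.2) ∉ s then
                let lx := if d.2 = 0 then (c.1, c.2) else (c.2, c.1)
                runs.modify lx.1 [] (fun l => l ++ [lx.2])
              else runs)
            (PySem.Dict.empty : PySem.Dict Int (List Int))
          runs.values.foldl
            (fun sides xs =>
              ((PySem.List.sorted xs (fun x => x)).foldl
                (fun (q : Int × Int) x => (if x ≠ q.2 + 1 then q.1 + 1 else q.1, x))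
                (sides, -2)).1)
            sides)
        0
      total + PySem.List.len island * sides)
    0

-- ===== PRECONDITION & SPEC =====
def Spec_count_side (islands : List (List (Int × Int))) (out : Int) : Prop :=
  out = count_side_alt islands
instance (islands : List (List (Int × Int))) (out : Int) : Decidable (Spec_count_side islands out) := by
  unfold Spec_count_side; infer_instance

-- ===== CLAIM (what is proved, stated in full; the proofs are below) =====
def Claim_equal_count_side : Prop := ∀ (islands : List (List (Int × Int))), Dom_count_side islands → Spec_count_side islands (count_side islands)

-- ===== LEMMAS AND PROOFS =====

-- the run-count scan step and the run count of a coordinate list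
def pvStep (q : Int × Int) (x : Int) : Int × Int :=
  (if x ≠ q.2 + 1 then q.1 + 1 else q.1, x)

def pvRuns (xs : List Int) : Int :=
  ((PySem.List.sorted xs (fun x => x)).foldl pvStep (0, -2)).1

-- the group of line t (all cells of S on line t, in S's order)
def pvGrp (key : Int × Int → Int) (S : List (Int × Int)) (t : Int) : List (Int × Int) :=
  S.filter (fun c => key c == t)

-- the per-layer value of one sweep: the run count of the exposed scan coordinates of line t
def pvF (key sel : Int × Int → Int) (adj : Int × Int → Int × Int)
    (S : List (Int × Int)) (t : Int) : Int :=
  pvRuns ((S.filter (fun c => decide (key c = t ∧ adj c ∉ S))).map sel)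

-- the scan's count component is affine in its start value
lemma scan_shift : ∀ (xs : List Int) (nb last : Int),
    (xs.foldl pvStep (nb, last)).1 = nb + (xs.foldl pvStep (0, last)).1 := by
  intro xs
  induction xs with
  | nil => intro nb last; simp
  | cons x xs ih =>
    intro nb last
    simp only [List.foldl_cons, pvStep]
    rw [ih _ x, ih (if x ≠ last + 1 then 0 + 1 else 0) x]
    split_ifs <;> omega

-- stable sorting by a key commutes with mapping the key out
lemma sorted_map_sel (T : List (Int × Int)) (sel : Int × Int → Int) :
    (PySem.List.sorted T sel).map sel = PySem.List.sorted (T.map sel) (fun x => x) := by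
  refine (PySem.List.sorted_id_eq_of_perm_of_pairwise _ _ ?_ ?_).symm
  · exact (PySem.List.sorted_perm T sel false).map sel
  · exact List.pairwise_map.mpr (PySem.List.sorted_pairwise T sel)

-- (1) the grouping loop is the plain modify loop
lemma pvGroup_eq_modify (key : Int × Int → Int) (S : List (Int × Int)) :
    pvGroup key S = S.foldl (fun d c => d.modify (key c) [] (fun l => l ++ [c])) PySem.Dict.empty := by
  unfold pvGroup
  congr 1
  funext d c
  by_cases h : d.contains (key c) = true
  · simp [h]
  · simp only [h, if_neg, Bool.false_eq_true, not_false_eq_true, if_false]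
    show (d.insert (key c) []).modify (key c) [] (fun l => l ++ [c]) = _
    simp [PySem.Dict.modify, PySem.Dict.getD_insert_self, PySem.Dict.insert_insert_self,
      PySem.Dict.getD_of_not_contains d [] (by simpa using h)]

-- (2) keys of the grouping dict
lemma pvGroup_keys (key : Int × Int → Int) (S : List (Int × Int)) :
    (pvGroup key S).keys = PySem.Set.ofList (S.map key) := by
  rw [pvGroup_eq_modify]
  rw [PySem.Dict.keys_foldl_modify_key S key [] (fun _ c => (fun l => l ++ [c])) PySem.Dict.empty]
  simp [PySem.Dict.keys_empty, PySem.Set.update, PySem.Set.ofList, PySem.Set.empty]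

lemma pvGroup_keys_nodup (key : Int × Int → Int) (S : List (Int × Int)) :
    (pvGroup key S).keys.Nodup := by
  rw [pvGroup_eq_modify]
  exact PySem.Dict.nodup_keys_foldl_modify_key S key [] (fun _ c => (fun l => l ++ [c]))
    PySem.Dict.empty (by simp [PySem.Dict.keys_empty])

-- (3) values of the grouping dict
lemma pvGroup_getD (key : Int × Int → Int) (S : List (Int × Int)) (t : Int) :
    (pvGroup key S).getD t [] = pvGrp key S t := by
  rw [pvGroup_eq_modify]
  have hmap : S.foldl (fun d c => d.modify (key c) [] (fun l => l ++ [c])) PySem.Dict.empty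
      = (S.map (fun c => (key c, c))).foldl (fun d p => d.modify p.1 [] (fun l => l ++ [p.2]))
        PySem.Dict.empty := by
    rw [List.foldl_map]
  rw [hmap, PySem.Dict.getD_foldl_modify_append, PySem.Dict.getD_empty]
  rw [List.filter_map]
  rw [List.map_map]
  unfold pvGrp
  simp [Function.comp_def]

-- (4) one layer of a sweep: when the last_line test agrees with global membership, the layer
-- contributes the run count of the line's exposed scan coordinates
lemma sweep_step_eq (key sel : Int × Int → Int) (adj : Int × Int → Int × Int)
    (S : List (Int × Int)) (t : Int) (ll : List (Int × Int)) (nb : Int)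
    (hTest : ∀ c : Int × Int, key c = t → (adj c ∈ ll ↔ adj c ∈ S)) :
    pvSweepStep adj sel (nb, ll) (t, pvGrp key S t)
      = (nb + pvF key sel adj S t, pvGrp key S t) := by
  unfold pvSweepStep
  dsimp only
  have hshape : (fun (acc : List (Int × Int)) c => if adj c ∈ ll then acc else acc ++ [c])
      = (fun acc c => if adj c ∉ ll then acc ++ [c] else acc) := by
    funext acc c; rw [ite_not]
  rw [hshape, PySem.List.foldl_append_ite_eq_filter (fun c => adj c ∉ ll) _ [], List.nil_append]
  have h1 : (pvGrp key S t).filter (fun c => decide (adj c ∉ ll))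
      = (pvGrp key S t).filter (fun c => decide (adj c ∉ S)) := by
    refine List.filter_congr (fun c hc => ?_)
    have hk : key c = t := by simpa using (List.mem_filter.mp hc).2
    rw [decide_eq_decide]
    exact not_congr (hTest c hk)
  have hfe : (pvGrp key S t).filter (fun c => decide (adj c ∉ S))
      = S.filter (fun c => decide (key c = t ∧ adj c ∉ S)) := by
    unfold pvGrp
    rw [List.filter_filter]
    refine List.filter_congr (fun c _ => ?_)
    by_cases h : key c = t <;> by_cases h2 : adj c ∈ S <;> simp [h, h2]
  rw [h1, hfe]
  refine Prod.ext_iff.mpr ⟨?_, rfl⟩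
  dsimp only
  have hfoldmap : ∀ (T : List (Int × Int)) (init : Int × Int),
      T.foldl (fun (q : Int × Int) c => (if sel c ≠ q.2 + 1 then q.1 + 1 else q.1, sel c)) init
        = (T.map sel).foldl pvStep init := by
    intro T init
    rw [List.foldl_map]
    rfl
  rw [hfoldmap, sorted_map_sel, scan_shift]
  rfl

-- (5) the sweep over the sorted layers, generic in the four directions
lemma sweep_go (key sel : Int × Int → Int) (adj : Int × Int → Int × Int) (ka : Int → Int)
    (r : Int → Int → Prop)
    (S : List (Int × Int))
    (Hk_a : ∀ c, key (adj c) = ka (key c))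
    (Hr_ka : ∀ t, r (ka t) t)
    (Hr_step : ∀ t u, r u t → r u (ka t) ∨ u = ka t)
    (Hirr : ∀ t, ¬ r t t) (Hasym : ∀ t u, r t u → ¬ r u t) (Htrans : ∀ t u v, r t u → r u v → r t v) :
    ∀ (todo : List Int) (prev? : Option Int) (nb : Int),
      todo.Pairwise r →
      (match prev? with
       | none => ∀ c ∈ S, key c ∈ todo
       | some tp => (∀ c ∈ S, key c ∈ todo ∨ key c = tp ∨ r (key c) tp) ∧ (∀ t ∈ todo, r tp t)) →
      ((todo.map (fun t => (t, pvGrp key S t))).foldl (pvSweepStep adj sel)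
          (nb, match prev? with | none => [] | some tp => pvGrp key S tp)).1
        = nb + ((todo.map (fun t => pvF key sel adj S t)).sum) := by
  intro todo
  induction todo with
  | nil =>
    intro prev? nb _ _
    simp
  | cons t todo ih =>
    intro prev? nb hsorted hprev
    have hs := List.pairwise_cons.mp hsorted
    have hkadj : ∀ c : Int × Int, key c = t → key (adj c) = ka t := by
      intro c hkc; rw [Hk_a, hkc]
    have hka_not : ka t ∉ t :: todo := by
      intro hmem
      rcases List.mem_cons.mp hmem with h | h
      · have hrt := Hr_ka t
        rw [h] at hrt
        exact Hirr t hrt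
      · exact Hasym t (ka t) (hs.1 (ka t) h) (Hr_ka t)
    have hTest : ∀ c : Int × Int, key c = t →
        (adj c ∈ (match prev? with | none => ([] : List (Int × Int)) | some tp => pvGrp key S tp)
          ↔ adj c ∈ S) := by
      intro c hkc
      cases prev? with
      | none =>
        simp only [List.not_mem_nil, false_iff]
        intro hinS
        have hp : ∀ x ∈ S, key x ∈ t :: todo := hprev
        exact hka_not (hkadj c hkc ▸ hp (adj c) hinS)
      | some tp =>
        have hp : (∀ x ∈ S, key x ∈ t :: todo ∨ key x = tp ∨ r (key x) tp)
            ∧ (∀ u ∈ t :: todo, r tp u) := hprev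
        constructor
        · intro h
          exact (List.mem_filter.mp h).1
        · intro hinS
          have hkadj' : key (adj c) = ka t := hkadj c hkc
          rcases hp.1 (adj c) hinS with h | h | h
          · exact absurd (hkadj' ▸ h) hka_not
          · simp [pvGrp, List.mem_filter, hinS, h]
          · exfalso
            have h' : r (ka t) tp := hkadj' ▸ h
            have htpt : r tp t := hp.2 t (List.mem_cons_self ..)
            rcases Hr_step t tp htpt with h2 | h2
            · exact Hasym (ka t) tp h' h2
            · rw [h2] at h'
              exact Hirr (ka t) h'
    rw [List.map_cons, List.foldl_cons,
      sweep_step_eq key sel adj S t _ nb hTest]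
    rw [ih (some t) _ hs.2 ?_]
    · rw [List.map_cons, List.sum_cons]; ring
    · refine ⟨?_, hs.1⟩
      intro c hcS
      cases prev? with
      | none =>
        rcases List.mem_cons.mp (hprev c hcS) with h | h
        · exact Or.inr (Or.inl h)
        · exact Or.inl h
      | some tp =>
        rcases hprev.1 c hcS with h | h | h
        · rcases List.mem_cons.mp h with h' | h'
          · exact Or.inr (Or.inl h')
          · exact Or.inl h'
        · exact Or.inr (Or.inr (h ▸ hprev.2 t (List.mem_cons_self ..)))
        · exact Or.inr (Or.inr (Htrans (key c) tp t h (hprev.2 t (List.mem_cons_self ..))))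

-- (6) one whole sweep equals the sum of the per-line run counts over the distinct lines
lemma sweep_eq_sum (key sel : Int × Int → Int) (adj : Int × Int → Int × Int) (ka : Int → Int)
    (r : Int → Int → Prop) (rev : Bool)
    (S : List (Int × Int))
    (Hk_a : ∀ c, key (adj c) = ka (key c))
    (Hr_ka : ∀ t, r (ka t) t)
    (Hr_step : ∀ t u, r u t → r u (ka t) ∨ u = ka t)
    (Hirr : ∀ t, ¬ r t t) (Hasym : ∀ t u, r t u → ¬ r u t) (Htrans : ∀ t u v, r t u → r u v → r t v)
    (Hsorted : ((PySem.List.sorted (pvGroup key S).items (fun x => x.1) rev).map (fun kl => kl.1)).Pairwise r)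
    (nb : Int) :
    pvSweep adj sel (PySem.List.sorted (pvGroup key S).items (fun x => x.1) rev) nb
      = nb + (((PySem.List.sorted (pvGroup key S).items (fun x => x.1) rev).map
          (fun kl => kl.1)).map (fun t => pvF key sel adj S t)).sum := by
  have hitems : (pvGroup key S).items
      = (pvGroup key S).keys.map (fun k => (k, (pvGroup key S).getD k [])) :=
    PySem.Dict.items_eq_map_keys _ (pvGroup_keys_nodup key S) []
  have hpermI := PySem.List.sorted_perm (pvGroup key S).items (fun x => x.1) rev
  have hchar : ∀ kl ∈ PySem.List.sorted (pvGroup key S).items (fun x => x.1) rev,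
      kl = (kl.1, pvGrp key S kl.1) := by
    intro kl hkl
    have hklI : kl ∈ (pvGroup key S).items := hpermI.mem_iff.mp hkl
    rw [hitems] at hklI
    rcases List.mem_map.mp hklI with ⟨k, _, hkeq⟩
    rw [← hkeq]
    simp [pvGroup_getD]
  have hL : PySem.List.sorted (pvGroup key S).items (fun x => x.1) rev
      = ((PySem.List.sorted (pvGroup key S).items (fun x => x.1) rev).map (fun kl => kl.1)).map
          (fun t => (t, pvGrp key S t)) := by
    rw [List.map_map]
    conv_lhs => rw [← List.map_id (PySem.List.sorted (pvGroup key S).items (fun x => x.1) rev)]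
    refine List.map_congr_left (fun kl hkl => ?_)
    exact hchar kl hkl
  have hcov : ∀ c ∈ S, key c ∈ (PySem.List.sorted (pvGroup key S).items (fun x => x.1) rev).map
      (fun kl => kl.1) := by
    intro c hcS
    refine ((hpermI.map (fun kl => kl.1)).mem_iff).mpr ?_
    show key c ∈ (pvGroup key S).keys
    rw [pvGroup_keys]
    rw [PySem.Set.mem_ofList]
    exact List.mem_map.mpr ⟨c, hcS, rfl⟩
  unfold pvSweep
  conv_lhs => rw [hL]
  rw [sweep_go key sel adj ka r S Hk_a Hr_ka Hr_step Hirr Hasym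
    Htrans ((PySem.List.sorted (pvGroup key S).items (fun x => x.1) rev).map (fun kl => kl.1))
    none nb Hsorted hcov]

-- sorted key lists of the grouping dict: nodup and full coverage
lemma sorted_keys_nodup (key : Int × Int → Int) (S : List (Int × Int)) (rev : Bool) :
    ((PySem.List.sorted (pvGroup key S).items (fun x => x.1) rev).map (fun kl => kl.1)).Nodup := by
  have hperm := PySem.List.sorted_perm (pvGroup key S).items (fun x => x.1) rev
  refine ((hperm.map (fun kl => kl.1)).nodup_iff).mpr ?_
  show ((pvGroup key S).keys).Nodup
  exact pvGroup_keys_nodup key S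

lemma mem_sorted_keys (key : Int × Int → Int) (S : List (Int × Int)) (rev : Bool) (t : Int) :
    t ∈ ((PySem.List.sorted (pvGroup key S).items (fun x => x.1) rev).map (fun kl => kl.1))
      ↔ t ∈ S.map key := by
  have hperm := PySem.List.sorted_perm (pvGroup key S).items (fun x => x.1) rev
  rw [(hperm.map (fun kl => kl.1)).mem_iff]
  show t ∈ (pvGroup key S).keys ↔ _
  rw [pvGroup_keys, PySem.Set.mem_ofList]

-- ascending/descending sorting: sorting with reverse=True is sorting by the dual key
lemma sorted_true_toDual {α : Type} (xs : List α) (key : α → Int) :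
    PySem.List.sorted xs key true
      = PySem.List.sorted xs (fun x => OrderDual.toDual (key x)) false := by
  unfold PySem.List.sorted
  have : (fun (a b : α) => decide (OrderDual.toDual (key a) < OrderDual.toDual (key b)))
      = (fun (a b : α) => decide (key b < key a)) := by
    funext a b
    rw [decide_eq_decide]
    exact OrderDual.toDual_lt_toDual
  simp only [if_pos, Bool.false_eq_true, if_false, this]

-- ascending / descending pairwise facts about the sorted items of the grouping dict
lemma sorted_items_pairwise_lt (key : Int × Int → Int) (S : List (Int × Int)) :
    ((PySem.List.sorted (pvGroup key S).items (fun x => x.1)).map (fun kl => kl.1)).Pairwise (· < ·) := by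
  have hpair := PySem.List.sorted_pairwise (pvGroup key S).items (fun x => x.1)
  have hnd := sorted_keys_nodup key S false
  have hne := List.pairwise_map.mp hnd
  rw [List.pairwise_map]
  exact (hpair.and hne).imp (fun h => lt_of_le_of_ne h.1 h.2)

lemma sorted_items_pairwise_gt (key : Int × Int → Int) (S : List (Int × Int)) :
    ((PySem.List.sorted (pvGroup key S).items (fun x => x.1) true).map (fun kl => kl.1)).Pairwise (· > ·) := by
  have hnd := sorted_keys_nodup key S true
  rw [sorted_true_toDual] at hnd ⊢
  have hpair := PySem.List.sorted_pairwise (pvGroup key S).items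
    (fun x => OrderDual.toDual x.1)
  have hne := List.pairwise_map.mp hnd
  rw [List.pairwise_map]
  exact (hpair.and hne).imp (fun h => lt_of_le_of_ne h.1 (fun he => h.2 he.symm))


-- (7) summing f over a key list is insensitive to keys where f vanishes
lemma sum_sub_zero (f : Int → Int) (K K' : List Int) (hK : K.Nodup) (hK' : K'.Nodup)
    (hsub : ∀ t ∈ K', t ∈ K) (hzero : ∀ t ∈ K, t ∉ K' → f t = 0) :
    (K.map f).sum = (K'.map f).sum := by
  have h1 : ∀ (K0 : List Int), (∀ t ∈ K0, t ∉ K' → f t = 0) →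
      (K0.map f).sum = ((K0.filter (fun t => decide (t ∈ K'))).map f).sum := by
    intro K0
    induction K0 with
    | nil => intro _; simp
    | cons a K0 ih =>
      intro hz
      have hz' : ∀ t ∈ K0, t ∉ K' → f t = 0 := fun t ht => hz t (by simp [ht])
      by_cases h : a ∈ K'
      · simp only [List.map_cons, List.sum_cons, List.filter_cons, h, decide_true, if_pos]
        rw [ih hz']
      · simp only [List.map_cons, List.sum_cons, List.filter_cons, h, decide_false,
          Bool.false_eq_true, if_false, hz a (by simp) h, zero_add]
        exact ih hz'
  have hperm : List.Perm (K.filter (fun t => decide (t ∈ K'))) K' := by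
    rw [List.perm_ext_iff_of_nodup (hK.filter _) hK']
    intro a
    simp only [List.mem_filter, decide_eq_true_eq]
    exact ⟨fun h => h.2, fun h => ⟨hsub a h, h⟩⟩
  rw [h1 K hzero, (hperm.map f).sum_eq]

-- (8) B's per-direction pass equals the per-line run-count sum over its own key list
lemma B_dir_eq (S : List (Int × Int)) (d1 d2 : Int) (key sel : Int × Int → Int)
    (adj : Int × Int → Int × Int)
    (hadj : ∀ c : Int × Int, (c.1 + d1, c.2 + d2) = adj c)
    (hlx : ∀ c : Int × Int, (if d2 = 0 then (c.1, c.2) else (c.2, c.1)) = (key c, sel c))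
    (sides0 : Int) :
    (S.foldl
        (fun runs c =>
          if (c.1 + d1, c.2 + d2) ∉ S then
            let lx := if d2 = 0 then (c.1, c.2) else (c.2, c.1)
            runs.modify lx.1 [] (fun l => l ++ [lx.2])
          else runs)
        (PySem.Dict.empty : PySem.Dict Int (List Int))).values.foldl
        (fun sides xs =>
          ((PySem.List.sorted xs (fun x => x)).foldl
            (fun (q : Int × Int) x => (if x ≠ q.2 + 1 then q.1 + 1 else q.1, x))
            (sides, -2)).1)
        sides0
      = sides0 + ((PySem.Set.ofList ((S.filter (fun c => decide (adj c ∉ S))).map key)).map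
          (fun t => pvF key sel adj S t)).sum := by
  have hstep : (fun (runs : PySem.Dict Int (List Int)) (c : Int × Int) =>
        if (c.1 + d1, c.2 + d2) ∉ S then
          let lx := if d2 = 0 then (c.1, c.2) else (c.2, c.1)
          runs.modify lx.1 [] (fun l => l ++ [lx.2])
        else runs)
      = (fun runs c => if adj c ∉ S then runs.modify (key c) [] (fun l => l ++ [sel c])
          else runs) := by
    funext runs c
    rw [hadj c, hlx c]
  rw [hstep, PySem.List.foldl_ite_eq_foldl_filter (fun c => adj c ∉ S)]
  set E := S.filter (fun c => decide (adj c ∉ S)) with hE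
  have hkeys : (E.foldl (fun runs c => runs.modify (key c) [] (fun l => l ++ [sel c]))
      PySem.Dict.empty).keys = PySem.Set.ofList (E.map key) := by
    rw [PySem.Dict.keys_foldl_modify_key E key [] (fun _ c => (fun l => l ++ [sel c]))
      PySem.Dict.empty]
    simp [PySem.Dict.keys_empty, PySem.Set.update, PySem.Set.ofList, PySem.Set.empty]
  have hkeys_nd : (E.foldl (fun runs c => runs.modify (key c) [] (fun l => l ++ [sel c]))
      PySem.Dict.empty).keys.Nodup :=
    PySem.Dict.nodup_keys_foldl_modify_key E key [] (fun _ c => (fun l => l ++ [sel c]))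
      PySem.Dict.empty (by simp [PySem.Dict.keys_empty])
  have hgetD : ∀ t : Int, (E.foldl (fun runs c => runs.modify (key c) [] (fun l => l ++ [sel c]))
      PySem.Dict.empty).getD t [] = (E.filter (fun c => key c == t)).map sel := by
    intro t
    have hmap : E.foldl (fun runs c => runs.modify (key c) [] (fun l => l ++ [sel c]))
        PySem.Dict.empty
        = (E.map (fun c => (key c, sel c))).foldl
            (fun runs p => runs.modify p.1 [] (fun l => l ++ [p.2])) PySem.Dict.empty := by
      rw [List.foldl_map]
    rw [hmap, PySem.Dict.getD_foldl_modify_append, PySem.Dict.getD_empty]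
    rw [List.filter_map, List.map_map]
    simp [Function.comp_def]
  have hvalues : (E.foldl (fun runs c => runs.modify (key c) [] (fun l => l ++ [sel c]))
      PySem.Dict.empty).values
      = (PySem.Set.ofList (E.map key)).map
          (fun t => (E.filter (fun c => key c == t)).map sel) := by
    rw [PySem.Dict.values_eq_map_keys _ hkeys_nd [], hkeys]
    exact List.map_congr_left (fun t _ => hgetD t)
  rw [hvalues]
  have hscan : (fun (sides : Int) (xs : List Int) =>
        ((PySem.List.sorted xs (fun x => x)).foldl
          (fun (q : Int × Int) x => (if x ≠ q.2 + 1 then q.1 + 1 else q.1, x)) (sides, -2)).1)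
      = (fun sides xs => sides + pvRuns xs) := by
    funext sides xs
    show ((PySem.List.sorted xs (fun x => x)).foldl pvStep (sides, -2)).1 = _
    rw [scan_shift]
    rfl
  rw [hscan, List.foldl_map, PySem.List.foldl_add]
  congr 1
  refine congrArg _ (List.map_congr_left (fun t _ => ?_))
  show pvRuns ((E.filter (fun c => key c == t)).map sel) = pvF key sel adj S t
  unfold pvF
  congr 2
  rw [hE, List.filter_filter]
  refine List.filter_congr (fun c _ => ?_)
  by_cases h : key c = t <;> by_cases h2 : adj c ∈ S <;> simp [h, h2]

-- (9) per direction: A's sorted-key sum equals B's exposed-line-key sum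
lemma dir_sum_eq (key sel : Int × Int → Int) (adj : Int × Int → Int × Int)
    (S : List (Int × Int)) (rev : Bool) :
    (((PySem.List.sorted (pvGroup key S).items (fun x => x.1) rev).map (fun kl => kl.1)).map
        (fun t => pvF key sel adj S t)).sum
      = ((PySem.Set.ofList ((S.filter (fun c => decide (adj c ∉ S))).map key)).map
          (fun t => pvF key sel adj S t)).sum := by
  refine sum_sub_zero _ _ _ (sorted_keys_nodup key S rev) (PySem.Set.nodup_ofList _) ?_ ?_
  · intro t ht
    rw [mem_sorted_keys]
    rw [PySem.Set.mem_ofList] at ht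
    rcases List.mem_map.mp ht with ⟨c, hc, hkc⟩
    exact List.mem_map.mpr ⟨c, (List.mem_filter.mp hc).1, hkc⟩
  · intro t _ htn
    unfold pvF
    have hnil : S.filter (fun c => decide (key c = t ∧ adj c ∉ S)) = [] := by
      rw [List.filter_eq_nil_iff]
      intro c hc hcond
      rw [decide_eq_true_eq] at hcond
      refine htn ?_
      rw [PySem.Set.mem_ofList]
      exact List.mem_map.mpr ⟨c, List.mem_filter.mpr ⟨hc, by simpa using hcond.2⟩, hcond.1⟩
    rw [hnil]
    rfl

-- (10) B's whole per-island direction fold, expanded and evaluated direction by direction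
lemma B_island_eq (S : List (Int × Int)) :
    [((-1 : Int), (0 : Int)), (1, 0), (0, -1), (0, 1)].foldl
      (fun sides d =>
        let runs := S.foldl
          (fun runs c =>
            if (c.1 + d.1, c.2 + d.2) ∉ S then
              let lx := if d.2 = 0 then (c.1, c.2) else (c.2, c.1)
              runs.modify lx.1 [] (fun l => l ++ [lx.2])
            else runs)
          (PySem.Dict.empty : PySem.Dict Int (List Int))
        runs.values.foldl
          (fun sides xs =>
            ((PySem.List.sorted xs (fun x => x)).foldl
              (fun (q : Int × Int) x => (if x ≠ q.2 + 1 then q.1 + 1 else q.1, x))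
              (sides, -2)).1)
          sides) 0
    = 0 + ((PySem.Set.ofList ((S.filter (fun c => decide ((fun c => (c.1 - 1, c.2)) c ∉ S))).map
          (fun c => c.1))).map (fun t => pvF (fun c => c.1) (fun c => c.2)
            (fun c => (c.1 - 1, c.2)) S t)).sum
      + ((PySem.Set.ofList ((S.filter (fun c => decide ((fun c => (c.1 + 1, c.2)) c ∉ S))).map
          (fun c => c.1))).map (fun t => pvF (fun c => c.1) (fun c => c.2)
            (fun c => (c.1 + 1, c.2)) S t)).sum
      + ((PySem.Set.ofList ((S.filter (fun c => decide ((fun c => (c.1, c.2 - 1)) c ∉ S))).map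
          (fun c => c.2))).map (fun t => pvF (fun c => c.2) (fun c => c.1)
            (fun c => (c.1, c.2 - 1)) S t)).sum
      + ((PySem.Set.ofList ((S.filter (fun c => decide ((fun c => (c.1, c.2 + 1)) c ∉ S))).map
          (fun c => c.2))).map (fun t => pvF (fun c => c.2) (fun c => c.1)
            (fun c => (c.1, c.2 + 1)) S t)).sum := by
  have e : ∀ (sides d1 d2 : Int),
      (let runs := S.foldl
          (fun runs c =>
            if (c.1 + (d1, d2).1, c.2 + (d1, d2).2) ∉ S then
              let lx := if (d1, d2).2 = 0 then (c.1, c.2) else (c.2, c.1)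
              runs.modify lx.1 [] (fun l => l ++ [lx.2])
            else runs)
          (PySem.Dict.empty : PySem.Dict Int (List Int));
        runs.values.foldl
          (fun sides xs =>
            ((PySem.List.sorted xs (fun x => x)).foldl
              (fun (q : Int × Int) x => (if x ≠ q.2 + 1 then q.1 + 1 else q.1, x))
              (sides, -2)).1)
          sides)
      = (S.foldl
          (fun runs c =>
            if (c.1 + d1, c.2 + d2) ∉ S then
              let lx := if d2 = 0 then (c.1, c.2) else (c.2, c.1)
              runs.modify lx.1 [] (fun l => l ++ [lx.2])
            else runs)
          (PySem.Dict.empty : PySem.Dict Int (List Int))).values.foldl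
          (fun sides xs =>
            ((PySem.List.sorted xs (fun x => x)).foldl
              (fun (q : Int × Int) x => (if x ≠ q.2 + 1 then q.1 + 1 else q.1, x))
              (sides, -2)).1)
          sides := fun _ _ _ => rfl
  rw [List.foldl_cons, List.foldl_cons, List.foldl_cons, List.foldl_cons, List.foldl_nil]
  rw [e, e, e, e]
  rw [B_dir_eq S (-1) 0 (fun c => c.1) (fun c => c.2) (fun c => (c.1 - 1, c.2))
    (fun c => by rw [Prod.mk.injEq]; exact ⟨by ring, by ring⟩) (fun c => by norm_num) 0]
  rw [B_dir_eq S 1 0 (fun c => c.1) (fun c => c.2) (fun c => (c.1 + 1, c.2))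
    (fun c => by rw [Prod.mk.injEq]; exact ⟨by ring, by ring⟩) (fun c => by norm_num) _]
  rw [B_dir_eq S 0 (-1) (fun c => c.2) (fun c => c.1) (fun c => (c.1, c.2 - 1))
    (fun c => by rw [Prod.mk.injEq]; exact ⟨by ring, by ring⟩) (fun c => by norm_num) _]
  rw [B_dir_eq S 0 1 (fun c => c.2) (fun c => c.1) (fun c => (c.1, c.2 + 1))
    (fun c => by rw [Prod.mk.injEq]; exact ⟨by ring, by ring⟩) (fun c => by norm_num) _]

-- ===== VERDICT (by name: the statement is the Claim_ definition above) =====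
set_option maxHeartbeats 2000000 in
theorem count_side_spec : Claim_equal_count_side := by
  intro islands _
  unfold Spec_count_side count_side count_side_alt
  refine PySem.List.foldl_congr_mem' _ _ _ _ ?_
  intro island hisl count
  dsimp only
  simp only [PySem.Set.mem_ofList]
  -- A's four sweeps, from innermost outwards
  rw [sweep_eq_sum (fun c => c.1) (fun c => c.2) (fun c => (c.1 - 1, c.2))
    (fun t => t - 1) (· < ·) false island (fun c => rfl)
    (fun t => by dsimp only; omega) (fun t u h => by dsimp only at *; omega)
    (fun t => by dsimp only; omega) (fun t u h => by dsimp only at *; omega)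
    (fun t u v h1' h2' => by dsimp only at *; omega)
    (sorted_items_pairwise_lt (fun c => c.1) island) 0]
  rw [sweep_eq_sum (fun c => c.1) (fun c => c.2) (fun c => (c.1 + 1, c.2))
    (fun t => t + 1) (· > ·) true island (fun c => rfl)
    (fun t => by dsimp only; omega) (fun t u h => by dsimp only at *; omega)
    (fun t => by dsimp only; omega) (fun t u h => by dsimp only at *; omega)
    (fun t u v h1' h2' => by dsimp only at *; omega)
    (sorted_items_pairwise_gt (fun c => c.1) island) _]
  rw [sweep_eq_sum (fun c => c.2) (fun c => c.1) (fun c => (c.1, c.2 - 1))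
    (fun t => t - 1) (· < ·) false island (fun c => rfl)
    (fun t => by dsimp only; omega) (fun t u h => by dsimp only at *; omega)
    (fun t => by dsimp only; omega) (fun t u h => by dsimp only at *; omega)
    (fun t u v h1' h2' => by dsimp only at *; omega)
    (sorted_items_pairwise_lt (fun c => c.2) island) _]
  rw [sweep_eq_sum (fun c => c.2) (fun c => c.1) (fun c => (c.1, c.2 + 1))
    (fun t => t + 1) (· > ·) true island (fun c => rfl)
    (fun t => by dsimp only; omega) (fun t u h => by dsimp only at *; omega)
    (fun t => by dsimp only; omega) (fun t u h => by dsimp only at *; omega)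
    (fun t u v h1' h2' => by dsimp only at *; omega)
    (sorted_items_pairwise_gt (fun c => c.2) island) _]
  -- B's four directions, expanding the literal direction list
  rw [B_island_eq island]
  rw [dir_sum_eq (fun c => c.1) (fun c => c.2) (fun c => (c.1 - 1, c.2)) island false,
    dir_sum_eq (fun c => c.1) (fun c => c.2) (fun c => (c.1 + 1, c.2)) island true,
    dir_sum_eq (fun c => c.2) (fun c => c.1) (fun c => (c.1, c.2 - 1)) island false,
    dir_sum_eq (fun c => c.2) (fun c => c.1) (fun c => (c.1, c.2 + 1)) island true]
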